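-- pv_equiv track=rewrite | github.com/ADITYA-BHATTACHARYA-DEV/Rag_OpenCV-Bot-Pipeline | react.py | _post_process_text
-- ===== SOURCE A (Python) =====
-- def _post_process_text(text: str) -> str:
--     # Fix common OCR errors in technical documents
--     replacements = {
--         'voltagc': 'voltage',
--         'curren1': 'current',
--         'resislor': 'resistor',
--         'capaci1or': 'capacitor'
--     }
--
--     for wrong, correct in replacements.items():
--         text = text.replace(wrong, correct)
--
--     return text
-- ===== SOURCE B (Python) =====
-- def _post_process_text(text: str) -> str:
--     # Fix 'resislor' first: a 'capaci1or' occurrence may overlap the leading 'r'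
--     # of a following 'resislor'; fixing 'resislor' first lets both typos be
--     # corrected.  Then fix the three remaining typos in ONE left-to-right scan
--     # with a table lookup instead of three more full-text passes.
--     text = text.replace('resislor', 'resistor')
--     replacements = {
--         'voltagc': 'voltage',
--         'curren1': 'current',
--         'capaci1or': 'capacitor'
--     }
--     out = []
--     i = 0
--     n = len(text)
--     while i < n:
--         for wrong, correct in replacements.items():
--             if text.startswith(wrong, i):
--                 out.append(correct)
--                 i += len(wrong)
--                 break
--         else:
--             out.append(text[i])
--             i += 1
--     return ''.join(out)
-- ===== Notes on version B (the rewrite author's own statement) =====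
-- stated objective: alternative
-- what changed: Instead of four independent full-text replace passes, B does one replace pass for the resistor typo (first, because a capacitor-typo occurrence can overlap its leading letter) and then corrects the remaining three typos in a single left-to-right scan with a table lookup per position.
import Mathlib
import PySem

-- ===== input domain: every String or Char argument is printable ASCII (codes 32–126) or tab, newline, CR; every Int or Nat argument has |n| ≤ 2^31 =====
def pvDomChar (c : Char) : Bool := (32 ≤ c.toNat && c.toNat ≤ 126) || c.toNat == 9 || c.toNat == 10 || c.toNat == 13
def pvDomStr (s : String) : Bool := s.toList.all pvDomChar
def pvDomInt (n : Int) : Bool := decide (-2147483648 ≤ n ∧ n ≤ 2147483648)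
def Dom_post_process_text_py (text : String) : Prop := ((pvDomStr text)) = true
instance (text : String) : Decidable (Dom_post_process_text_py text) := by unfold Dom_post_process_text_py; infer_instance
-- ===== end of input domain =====

-- B fixes the resistor typo first (a capacitor-typo occurrence can overlap its leading
-- letter), then corrects the three remaining typos in ONE left-to-right scan instead of
-- three more full-text replace passes; proved to return exactly A's value on every input.


-- ===== PORT A =====
-- A: four sequential full-text replace passes, in dict order.
def post_process_text_py (text : String) : String :=
  PySem.Str.replace
    (PySem.Str.replace
      (PySem.Str.replace
        (PySem.Str.replace text "voltagc" "voltage")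
        "curren1" "current")
      "resislor" "resistor")
    "capaci1or" "capacitor"

-- ===== PORT B =====
-- Source B's scan loop (`while i < n: try each pattern at i via startswith, else copy one
-- char`), ported by hand as structural recursion on the remaining characters; exact:
-- at each position the patterns are tried in dict order, on a match the correction is
-- emitted and the match length skipped, otherwise one character is copied.
def pvScanB (s : List Char) : List Char :=
  if h1 : ("voltagc".toList).isPrefixOf s then
    "voltage".toList ++ pvScanB (s.drop 7)
  else if h2 : ("curren1".toList).isPrefixOf s then
    "current".toList ++ pvScanB (s.drop 7)
  else if h3 : ("capaci1or".toList).isPrefixOf s then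
    "capacitor".toList ++ pvScanB (s.drop 9)
  else
    match s with
    | [] => []
    | ch :: t => ch :: pvScanB t
termination_by s.length
decreasing_by
  · have := (List.isPrefixOf_iff_prefix.mp h1).length_le; simp at this ⊢; omega
  · have := (List.isPrefixOf_iff_prefix.mp h2).length_le; simp at this ⊢; omega
  · have := (List.isPrefixOf_iff_prefix.mp h3).length_le; simp at this ⊢; omega
  · simp


def post_process_text_py_alt (text : String) : String :=
  String.ofList (pvScanB (PySem.Str.replace text "resislor" "resistor").toList)

-- ===== PRECONDITION & SPEC =====
def Spec_post_process_text_py (text : String) (out : String) : Prop := out = post_process_text_py_alt text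
instance (text : String) (out : String) : Decidable (Spec_post_process_text_py text out) := by unfold Spec_post_process_text_py; infer_instance

-- ===== CLAIM (what is proved, stated in full; the proofs are below) =====
def Claim_equal_post_process_text_py : Prop := ∀ (text : String), Dom_post_process_text_py text → Spec_post_process_text_py text (post_process_text_py text)

-- ===== LEMMAS AND PROOFS =====

def pvRep (p q s : List Char) : List Char :=
  if hp : p = [] then s
  else if h : p.isPrefixOf s then q ++ pvRep p q (s.drop p.length)
  else
    match s with
    | [] => []
    | ch :: t => ch :: pvRep p q t
termination_by s.length
decreasing_by
  · have h1 := (List.isPrefixOf_iff_prefix.mp h).length_le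
    have h2 : 0 < p.length := List.length_pos_iff.mpr hp
    simp; omega
  · simp

theorem pvRep_nil (p q : List Char) : pvRep p q [] = [] := by
  rw [pvRep]; split
  · rfl
  · split
    · rename_i hp h
      exact absurd (List.prefix_nil.mp (List.isPrefixOf_iff_prefix.mp h)) hp
    · rfl

theorem pvRep_pos (p q s : List Char) (hp : p ≠ []) (h : p <+: s) :
    pvRep p q s = q ++ pvRep p q (s.drop p.length) := by
  rw [pvRep]; simp [hp, List.isPrefixOf_iff_prefix.mpr h]

theorem pvRep_neg (p q : List Char) (ch : Char) (t : List Char) (hp : p ≠ [])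
    (h : ¬ p <+: (ch :: t)) : pvRep p q (ch :: t) = ch :: pvRep p q t := by
  rw [pvRep]
  rw [dif_neg hp, dif_neg (fun hc => h (List.isPrefixOf_iff_prefix.mp hc))]

theorem pvTake_prefix (p r x : List Char) (h : p <+: r ++ x) :
    p.take r.length <+: r := by
  have := h.take r.length
  rwa [List.take_left] at this

theorem pvRep_eq_go (p q : List Char) (hp : p ≠ []) :
    ∀ (fuel : Nat) (s acc : List Char), s.length ≤ fuel →
      PySem.Chars.replace.go p q fuel s acc = acc.reverse ++ pvRep p q s := by
  intro fuel
  induction fuel with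
  | zero =>
    intro s acc hs
    have : s = [] := List.eq_nil_of_length_eq_zero (Nat.le_zero.mp hs)
    subst this
    simp [PySem.Chars.replace.go, pvRep_nil]
  | succ n ih =>
    intro s acc hs
    match s with
    | [] => simp [PySem.Chars.replace.go, pvRep_nil]
    | ch :: t =>
      rw [PySem.Chars.replace.go]
      by_cases h : p.isPrefixOf (ch :: t)
      · have hpre := List.isPrefixOf_iff_prefix.mp h
        have hlen : 0 < p.length := List.length_pos_iff.mpr hp
        have hlen2 := hpre.length_le
        rw [if_pos h, ih _ _ (by simp at hs ⊢; omega),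
            pvRep_pos p q _ hp hpre]
        simp
      · rw [if_neg h, ih _ _ (by simp at hs ⊢; omega),
            pvRep_neg p q ch t hp (fun hc => h (List.isPrefixOf_iff_prefix.mpr hc))]
        simp

theorem pvRep_eq_replace (s p q : List Char) (hp : p ≠ []) :
    PySem.Chars.replace s p q = pvRep p q s := by
  rw [PySem.Chars.replace]
  rw [if_neg (by simpa using hp)]
  simpa using pvRep_eq_go p q hp s.length s [] le_rfl

def pvNoSpill (p r : List Char) : Prop :=
  ∀ j < r.length, ¬ ((p.take (r.length - j)) <+: r.drop j)

theorem pvRep_append (p q : List Char) (hp : p ≠ []) :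
    ∀ (r x : List Char), pvNoSpill p r → pvRep p q (r ++ x) = r ++ pvRep p q x := by
  intro r
  induction r with
  | nil => intro x _; simp
  | cons ch r' ih =>
    intro x h
    have hnp : ¬ p <+: (ch :: r') ++ x := by
      intro hc
      exact h 0 (by simp) (by simpa using pvTake_prefix p (ch :: r') x hc)
    rw [List.cons_append, pvRep_neg p q ch (r' ++ x) hp (by simpa using hnp)]
    rw [ih x (fun j hj => by
      have := h (j + 1) (by simp; omega)
      simpa using this)]
    simp

def pvNoCreate (r q : List Char) : Prop :=
  ∀ t ∈ r.tails, t ≠ [] → ¬ (t.take q.length <+: q)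

theorem pvRep_noCreate (p q r : List Char) (hp : p ≠ []) (hq : pvNoCreate r q) :
    ∀ (n : Nat) (s t : List Char), s.length ≤ n → t <:+ r → t <+: pvRep p q s → t <+: s := by
  intro n
  induction n with
  | zero =>
    intro s t hs _ ht
    have : s = [] := List.eq_nil_of_length_eq_zero (Nat.le_zero.mp hs)
    subst this
    rw [pvRep_nil] at ht
    simpa [List.prefix_nil.mp ht] using List.nil_prefix
  | succ n ih =>
    intro s t hs hsuf ht
    by_cases hps : p <+: s
    · rw [pvRep_pos p q s hp hps] at ht
      rcases t with _ | ⟨c0, t'⟩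
      · exact List.nil_prefix
      · exact absurd (pvTake_prefix _ q _ ht) (hq _ ((List.mem_tails _ _).mpr hsuf) (by simp))
    · match s with
      | [] => rw [pvRep_nil] at ht; simpa [List.prefix_nil.mp ht] using List.nil_prefix
      | ch :: u =>
        rw [pvRep_neg p q ch u hp hps] at ht
        rcases t with _ | ⟨c0, t'⟩
        · exact List.nil_prefix
        · obtain ⟨he, ht'⟩ := List.cons_prefix_cons.mp ht
          have hsuf' : t' <:+ r := List.IsSuffix.trans (List.suffix_cons c0 t') hsuf
          exact List.cons_prefix_cons.mpr ⟨he, ih u t' (by simp at hs ⊢; omega) hsuf' ht'⟩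

abbrev pvV : List Char := "voltagc".toList
abbrev pvC : List Char := "curren1".toList
abbrev pvR : List Char := "resislor".toList
abbrev pvK : List Char := "capaci1or".toList
abbrev pvv : List Char := "voltage".toList
abbrev pvc : List Char := "current".toList
abbrev pvr : List Char := "resistor".toList
abbrev pvk : List Char := "capacitor".toList

theorem pvScanB_nil : pvScanB [] = [] := by rw [pvScanB]; rfl

theorem pvScanB_v (s : List Char) (h : pvV <+: s) :
    pvScanB s = pvv ++ pvScanB (s.drop 7) := by
  rw [pvScanB, dif_pos (List.isPrefixOf_iff_prefix.mpr h)]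

theorem pvScanB_c (s : List Char) (h1 : ¬ pvV <+: s) (h : pvC <+: s) :
    pvScanB s = pvc ++ pvScanB (s.drop 7) := by
  rw [pvScanB, dif_neg (fun hc => h1 (List.isPrefixOf_iff_prefix.mp hc)),
      dif_pos (List.isPrefixOf_iff_prefix.mpr h)]

theorem pvScanB_k (s : List Char) (h1 : ¬ pvV <+: s) (h2 : ¬ pvC <+: s) (h : pvK <+: s) :
    pvScanB s = pvk ++ pvScanB (s.drop 9) := by
  rw [pvScanB, dif_neg (fun hc => h1 (List.isPrefixOf_iff_prefix.mp hc)),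
      dif_neg (fun hc => h2 (List.isPrefixOf_iff_prefix.mp hc)),
      dif_pos (List.isPrefixOf_iff_prefix.mpr h)]

theorem pvScanB_step (ch : Char) (t : List Char) (h1 : ¬ pvV <+: ch :: t)
    (h2 : ¬ pvC <+: ch :: t) (h3 : ¬ pvK <+: ch :: t) :
    pvScanB (ch :: t) = ch :: pvScanB t := by
  rw [pvScanB, dif_neg (fun hc => h1 (List.isPrefixOf_iff_prefix.mp hc)),
      dif_neg (fun hc => h2 (List.isPrefixOf_iff_prefix.mp hc)),
      dif_neg (fun hc => h3 (List.isPrefixOf_iff_prefix.mp hc))]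

def pvNoSpillB (p r : List Char) : Bool :=
  (List.range r.length).all (fun j => !(p.take (r.length - j)).isPrefixOf (r.drop j))

theorem pvNoSpill_of_B (p r : List Char) (h : pvNoSpillB p r = true) : pvNoSpill p r := by
  intro j hj hc
  have h2 := List.all_eq_true.mp h j (List.mem_range.mpr hj)
  rw [← List.isPrefixOf_iff_prefix] at hc
  simp [hc] at h2

def pvNoCreateB (r q : List Char) : Bool :=
  r.tails.all (fun t => t.isEmpty || !(t.take q.length).isPrefixOf q)

theorem pvNoCreate_of_B (r q : List Char) (h : pvNoCreateB r q = true) : pvNoCreate r q := by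
  intro t ht hne hc
  have := List.all_eq_true.mp h t ht
  rcases Bool.or_eq_true_iff.mp this with h1 | h1
  · exact hne (by simpa using h1)
  · rw [← List.isPrefixOf_iff_prefix] at hc
    simp [hc] at h1

theorem pvNotPrefix_of_rep (p q r s : List Char) (hp : p ≠ []) (hq : pvNoCreate r q)
    (h : ¬ r <+: s) : ¬ r <+: pvRep p q s :=
  fun hc => h (pvRep_noCreate p q r hp hq s.length s r le_rfl (List.suffix_refl r) hc)

theorem pvComm : ∀ (n : Nat) (s : List Char), s.length ≤ n →
    pvRep pvR pvr (pvRep pvC pvc (pvRep pvV pvv s)) =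
      pvRep pvC pvc (pvRep pvV pvv (pvRep pvR pvr s)) := by
  intro n
  induction n with
  | zero =>
    intro s hs
    have : s = [] := List.eq_nil_of_length_eq_zero (Nat.le_zero.mp hs)
    subst this
    simp [pvRep_nil]
  | succ n ih =>
    intro s hs
    by_cases hV : pvV <+: s
    · obtain ⟨u, rfl⟩ := hV
      rw [pvRep_pos pvV pvv _ (by decide) (List.prefix_append _ _), List.drop_left,
          pvRep_append pvC pvc (by decide) pvv _ (pvNoSpill_of_B _ _ (by decide)),
          pvRep_append pvR pvr (by decide) pvv _ (pvNoSpill_of_B _ _ (by decide)),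
          pvRep_append pvR pvr (by decide) pvV u (pvNoSpill_of_B _ _ (by decide)),
          pvRep_pos pvV pvv _ (by decide) (List.prefix_append _ _), List.drop_left,
          pvRep_append pvC pvc (by decide) pvv _ (pvNoSpill_of_B _ _ (by decide)),
          ih u (by rw [List.length_append] at hs; have h7 : ("voltagc".length) = 7 := rfl; have h8 : ("curren1".length) = 7 := rfl; have h9 : ("resislor".length) = 8 := rfl; simp [h7, h8, h9] at hs ⊢; omega)]
    · by_cases hC : pvC <+: s
      · obtain ⟨u, rfl⟩ := hC
        rw [pvRep_append pvV pvv (by decide) pvC u (pvNoSpill_of_B _ _ (by decide)),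
            pvRep_pos pvC pvc _ (by decide) (List.prefix_append _ _), List.drop_left,
            pvRep_append pvR pvr (by decide) pvc _ (pvNoSpill_of_B _ _ (by decide)),
            pvRep_append pvR pvr (by decide) pvC u (pvNoSpill_of_B _ _ (by decide)),
            pvRep_append pvV pvv (by decide) pvC _ (pvNoSpill_of_B _ _ (by decide)),
            pvRep_pos pvC pvc _ (by decide) (List.prefix_append _ _), List.drop_left,
            ih u (by rw [List.length_append] at hs; have h7 : ("voltagc".length) = 7 := rfl; have h8 : ("curren1".length) = 7 := rfl; have h9 : ("resislor".length) = 8 := rfl; simp [h7, h8, h9] at hs ⊢; omega)]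
      · by_cases hR : pvR <+: s
        · obtain ⟨u, rfl⟩ := hR
          rw [pvRep_append pvV pvv (by decide) pvR u (pvNoSpill_of_B _ _ (by decide)),
              pvRep_append pvC pvc (by decide) pvR _ (pvNoSpill_of_B _ _ (by decide)),
              pvRep_pos pvR pvr _ (by decide) (List.prefix_append _ _), List.drop_left,
              pvRep_pos pvR pvr _ (by decide) (List.prefix_append _ _), List.drop_left,
              pvRep_append pvV pvv (by decide) pvr _ (pvNoSpill_of_B _ _ (by decide)),
              pvRep_append pvC pvc (by decide) pvr _ (pvNoSpill_of_B _ _ (by decide)),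
              ih u (by rw [List.length_append] at hs; have h7 : ("voltagc".length) = 7 := rfl; have h8 : ("curren1".length) = 7 := rfl; have h9 : ("resislor".length) = 8 := rfl; simp [h7, h8, h9] at hs ⊢; omega)]
        · match s with
          | [] => simp [pvRep_nil]
          | ch :: u =>
            have e1 : pvRep pvV pvv (ch :: u) = ch :: pvRep pvV pvv u :=
              pvRep_neg pvV pvv ch u (by decide) hV
            have hnc1 : ¬ pvC <+: pvRep pvV pvv (ch :: u) :=
              pvNotPrefix_of_rep pvV pvv pvC _ (by decide) (pvNoCreate_of_B _ _ (by decide)) hC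
            have e2 : pvRep pvC pvc (pvRep pvV pvv (ch :: u)) =
                ch :: pvRep pvC pvc (pvRep pvV pvv u) := by
              rw [e1] at hnc1 ⊢
              exact pvRep_neg pvC pvc ch _ (by decide) hnc1
            have hnc2 : ¬ pvR <+: pvRep pvC pvc (pvRep pvV pvv (ch :: u)) :=
              pvNotPrefix_of_rep pvC pvc pvR _ (by decide) (pvNoCreate_of_B _ _ (by decide))
                (pvNotPrefix_of_rep pvV pvv pvR _ (by decide) (pvNoCreate_of_B _ _ (by decide)) hR)
            have e3 : pvRep pvR pvr (pvRep pvC pvc (pvRep pvV pvv (ch :: u))) =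
                ch :: pvRep pvR pvr (pvRep pvC pvc (pvRep pvV pvv u)) := by
              rw [e2] at hnc2 ⊢
              exact pvRep_neg pvR pvr ch _ (by decide) hnc2
            -- right-hand side
            have f1 : pvRep pvR pvr (ch :: u) = ch :: pvRep pvR pvr u :=
              pvRep_neg pvR pvr ch u (by decide) hR
            have hnc3 : ¬ pvV <+: pvRep pvR pvr (ch :: u) :=
              pvNotPrefix_of_rep pvR pvr pvV _ (by decide) (pvNoCreate_of_B _ _ (by decide)) hV
            have f2 : pvRep pvV pvv (pvRep pvR pvr (ch :: u)) =
                ch :: pvRep pvV pvv (pvRep pvR pvr u) := by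
              rw [f1] at hnc3 ⊢
              exact pvRep_neg pvV pvv ch _ (by decide) hnc3
            have hnc4 : ¬ pvC <+: pvRep pvV pvv (pvRep pvR pvr (ch :: u)) :=
              pvNotPrefix_of_rep pvV pvv pvC _ (by decide) (pvNoCreate_of_B _ _ (by decide))
                (pvNotPrefix_of_rep pvR pvr pvC _ (by decide) (pvNoCreate_of_B _ _ (by decide)) hC)
            have f3 : pvRep pvC pvc (pvRep pvV pvv (pvRep pvR pvr (ch :: u))) =
                ch :: pvRep pvC pvc (pvRep pvV pvv (pvRep pvR pvr u)) := by
              rw [f2] at hnc4 ⊢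
              exact pvRep_neg pvC pvc ch _ (by decide) hnc4
            rw [e3, f3, ih u (by simp at hs ⊢; omega)]

theorem pvMain : ∀ (n : Nat) (t : List Char), t.length ≤ n →
    pvRep pvK pvk (pvRep pvC pvc (pvRep pvV pvv t)) = pvScanB t := by
  intro n
  induction n with
  | zero =>
    intro t ht
    have : t = [] := List.eq_nil_of_length_eq_zero (Nat.le_zero.mp ht)
    subst this
    simp [pvRep_nil, pvScanB_nil]
  | succ n ih =>
    intro t ht
    by_cases hV : pvV <+: t
    · obtain ⟨u, rfl⟩ := hV
      have hd : (pvV ++ u).drop 7 = u := by rw [show (7:Nat) = pvV.length from rfl, List.drop_left]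
      rw [pvRep_pos pvV pvv _ (by decide) (List.prefix_append _ _), List.drop_left,
          pvRep_append pvC pvc (by decide) pvv _ (pvNoSpill_of_B _ _ (by decide)),
          pvRep_append pvK pvk (by decide) pvv _ (pvNoSpill_of_B _ _ (by decide)),
          pvScanB_v _ (List.prefix_append _ _), hd,
          ih u (by rw [List.length_append] at ht; have h7 : ("voltagc".length) = 7 := rfl; have h8 : ("curren1".length) = 7 := rfl; have h9 : ("capaci1or".length) = 9 := rfl; simp [h7, h8, h9] at ht ⊢; omega)]
    · by_cases hC : pvC <+: t
      · obtain ⟨u, rfl⟩ := hC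
        have hd : (pvC ++ u).drop 7 = u := by rw [show (7:Nat) = pvC.length from rfl, List.drop_left]
        rw [pvRep_append pvV pvv (by decide) pvC u (pvNoSpill_of_B _ _ (by decide)),
            pvRep_pos pvC pvc _ (by decide) (List.prefix_append _ _), List.drop_left,
            pvRep_append pvK pvk (by decide) pvc _ (pvNoSpill_of_B _ _ (by decide)),
            pvScanB_c _ hV (List.prefix_append _ _), hd,
            ih u (by rw [List.length_append] at ht; have h7 : ("voltagc".length) = 7 := rfl; have h8 : ("curren1".length) = 7 := rfl; have h9 : ("capaci1or".length) = 9 := rfl; simp [h7, h8, h9] at ht ⊢; omega)]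
      · by_cases hK : pvK <+: t
        · obtain ⟨u, rfl⟩ := hK
          have hd : (pvK ++ u).drop 9 = u := by rw [show (9:Nat) = pvK.length from rfl, List.drop_left]
          rw [pvRep_append pvV pvv (by decide) pvK u (pvNoSpill_of_B _ _ (by decide)),
              pvRep_append pvC pvc (by decide) pvK _ (pvNoSpill_of_B _ _ (by decide)),
              pvRep_pos pvK pvk _ (by decide) (List.prefix_append _ _), List.drop_left,
              pvScanB_k _ hV hC (List.prefix_append _ _), hd,
              ih u (by rw [List.length_append] at ht; have h7 : ("voltagc".length) = 7 := rfl; have h8 : ("curren1".length) = 7 := rfl; have h9 : ("capaci1or".length) = 9 := rfl; simp [h7, h8, h9] at ht ⊢; omega)]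
        · match t with
          | [] => simp [pvRep_nil, pvScanB_nil]
          | ch :: u =>
            have e1 : pvRep pvV pvv (ch :: u) = ch :: pvRep pvV pvv u :=
              pvRep_neg pvV pvv ch u (by decide) hV
            have hnc1 : ¬ pvC <+: pvRep pvV pvv (ch :: u) :=
              pvNotPrefix_of_rep pvV pvv pvC _ (by decide) (pvNoCreate_of_B _ _ (by decide)) hC
            have e2 : pvRep pvC pvc (pvRep pvV pvv (ch :: u)) =
                ch :: pvRep pvC pvc (pvRep pvV pvv u) := by
              rw [e1] at hnc1 ⊢
              exact pvRep_neg pvC pvc ch _ (by decide) hnc1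
            have hnc2 : ¬ pvK <+: pvRep pvC pvc (pvRep pvV pvv (ch :: u)) :=
              pvNotPrefix_of_rep pvC pvc pvK _ (by decide) (pvNoCreate_of_B _ _ (by decide))
                (pvNotPrefix_of_rep pvV pvv pvK _ (by decide) (pvNoCreate_of_B _ _ (by decide)) hK)
            have e3 : pvRep pvK pvk (pvRep pvC pvc (pvRep pvV pvv (ch :: u))) =
                ch :: pvRep pvK pvk (pvRep pvC pvc (pvRep pvV pvv u)) := by
              rw [e2] at hnc2 ⊢
              exact pvRep_neg pvK pvk ch _ (by decide) hnc2
            rw [e3, pvScanB_step ch u hV hC hK, ih u (by simp at ht ⊢; omega)]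

theorem pv_final (text : String) : post_process_text_py text = post_process_text_py_alt text := by
  unfold post_process_text_py post_process_text_py_alt
  simp only [PySem.Str.replace, String.toList_ofList]
  congr 1
  rw [pvRep_eq_replace _ _ _ (by decide), pvRep_eq_replace _ _ _ (by decide),
      pvRep_eq_replace _ _ _ (by decide), pvRep_eq_replace _ _ _ (by decide),
      pvRep_eq_replace _ _ _ (by decide)]
  rw [pvComm text.toList.length text.toList le_rfl]
  exact pvMain _ _ le_rfl

-- ===== VERDICT (by name: the statement is the Claim_ definition above) =====
theorem post_process_text_py_spec : Claim_equal_post_process_text_py := by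
  intro text _
  show post_process_text_py text = post_process_text_py_alt text
  exact pv_final text
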